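-- pv_equiv track=rewrite | github.com/pypi-data/pypi-mirror-274 | packages/vesselasid/vesselasid-1.0.19.tar.gz/vesselasid-1.0.19/vesselasid/asidrenderer.py | known_loopbacks
-- ===== SOURCE A (Python) =====
-- def known_loopbacks(names):
--     loopbacks = set()
--     for name in names:
--         for loopback in ("IAC Driver", "Midi Through"):
--             if loopback in name:
--                 loopbacks.add(name)
--                 break
--     others = set(names) - loopbacks
--     return sorted(list(loopbacks), reverse=True), sorted(list(others), reverse=True)
-- ===== SOURCE B (Python) =====
-- def known_loopbacks(names):
--     loopbacks, others = [], []
--     for name in names: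
--         target = loopbacks if ("IAC Driver" in name or "Midi Through" in name) else others
--         i = 0
--         while i < len(target) and target[i] > name:
--             i += 1
--         if i == len(target) or target[i] != name:
--             target.insert(i, name)
--     return loopbacks, others
-- ===== Notes on version B (the rewrite author's own statement) =====
-- stated objective: alternative
-- what changed: B never builds sets and never calls sort: it maintains the two result lists directly, inserting each incoming name into the correct descending-ordered list by linear insertion and skipping duplicates on the fly, instead of A's partition-into-sets followed by two separate sorts.
import Mathlib
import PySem

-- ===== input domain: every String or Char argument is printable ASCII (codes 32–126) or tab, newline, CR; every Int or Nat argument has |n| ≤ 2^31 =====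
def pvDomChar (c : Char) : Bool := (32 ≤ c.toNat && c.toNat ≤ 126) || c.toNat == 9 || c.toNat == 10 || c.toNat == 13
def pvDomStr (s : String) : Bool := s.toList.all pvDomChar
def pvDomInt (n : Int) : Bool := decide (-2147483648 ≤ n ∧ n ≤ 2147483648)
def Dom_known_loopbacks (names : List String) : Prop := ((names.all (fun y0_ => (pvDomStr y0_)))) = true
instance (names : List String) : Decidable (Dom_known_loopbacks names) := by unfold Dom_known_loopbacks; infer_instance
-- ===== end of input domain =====

-- B keeps the two result lists descending-ordered and duplicate-free by direct insertion,
-- with no sets and no sort calls; A partitions into sets and sorts each. Objective: alternative.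

-- ===== PORT A =====
-- inner 'for loopback in (...): if loopback in name: loopbacks.add(name); break'
def pvLoopAdd : List String → String → PySem.Set String → PySem.Set String
  | [], _, s => s
  | lb :: rest, name, s =>
      if PySem.Str.isIn lb name then PySem.Set.add s name else pvLoopAdd rest name s

def known_loopbacks (names : List String) : List String × List String :=
  let loopbacks : PySem.Set String :=
    names.foldl (fun s name => pvLoopAdd ["IAC Driver", "Midi Through"] name s) PySem.Set.empty
  let others : PySem.Set String := PySem.Set.diff (PySem.Set.ofList names) loopbacks
  (PySem.List.sorted loopbacks (fun x => x) true, PySem.List.sorted others (fun x => x) true)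

-- ===== PORT B =====
def pvIsLoopback (name : String) : Bool :=
  PySem.Str.isIn "IAC Driver" name || PySem.Str.isIn "Midi Through" name

-- the while-loop scan plus conditional 'insert' of Source B: step past larger entries,
-- drop the name if already present, otherwise splice it in
def pvInsertDesc (name : String) : List String → List String
  | [] => [name]
  | x :: rest =>
      if name < x then x :: pvInsertDesc name rest
      else if name = x then x :: rest
      else name :: x :: rest

def known_loopbacks_alt (names : List String) : List String × List String :=
  names.foldl
    (fun (acc : List String × List String) name =>
      if pvIsLoopback name then (pvInsertDesc name acc.1, acc.2)
      else (acc.1, pvInsertDesc name acc.2))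
    ([], [])

-- ===== PRECONDITION & SPEC =====
def Spec_known_loopbacks (names : List String) (out : List String × List String) : Prop := out = known_loopbacks_alt names
instance (names : List String) (out : List String × List String) : Decidable (Spec_known_loopbacks names out) := by unfold Spec_known_loopbacks; infer_instance

-- ===== CLAIM =====
def Claim_equal_known_loopbacks : Prop := ∀ (names : List String), Dom_known_loopbacks names → Spec_known_loopbacks names (known_loopbacks names)

-- ===== LEMMAS AND PROOFS =====

theorem pvLoopAdd_eq (name : String) (s : PySem.Set String) :
    pvLoopAdd ["IAC Driver", "Midi Through"] name s =
      if pvIsLoopback name then PySem.Set.add s name else s := by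
  simp only [pvLoopAdd, pvIsLoopback, Bool.or_eq_true]
  split_ifs <;> first | rfl | tauto

theorem pvFold_nodup (names : List String) (s : PySem.Set String) (hs : s.Nodup) :
    (names.foldl (fun s name => if pvIsLoopback name then PySem.Set.add s name else s) s).Nodup := by
  induction names generalizing s with
  | nil => exact hs
  | cons n t ih =>
      rw [List.foldl_cons]
      apply ih
      split
      · exact PySem.Set.nodup_add s n hs
      · exact hs

theorem pvFold_mem (names : List String) (s : PySem.Set String) (x : String) :
    (x ∈ names.foldl (fun s name => if pvIsLoopback name then PySem.Set.add s name else s) s) ↔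
      x ∈ s ∨ (x ∈ names ∧ pvIsLoopback x = true) := by
  induction names generalizing s with
  | nil => simp
  | cons n t ih =>
      rw [List.foldl_cons]
      by_cases h : pvIsLoopback n = true
      · rw [if_pos h, ih, PySem.Set.mem_add]
        simp only [List.mem_cons]
        constructor
        · rintro ((h1 | rfl) | ⟨hm, hp⟩)
          exacts [Or.inl h1, Or.inr ⟨Or.inl rfl, h⟩, Or.inr ⟨Or.inr hm, hp⟩]
        · rintro (h1 | ⟨(rfl | hm), hp⟩)
          exacts [Or.inl (Or.inl h1), Or.inl (Or.inr rfl), Or.inr ⟨hm, hp⟩]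
      · rw [if_neg h, ih]
        simp only [List.mem_cons]
        constructor
        · rintro (h1 | ⟨hm, hp⟩)
          exacts [Or.inl h1, Or.inr ⟨Or.inr hm, hp⟩]
        · rintro (h1 | ⟨(rfl | hm), hp⟩)
          exacts [Or.inl h1, absurd hp h, Or.inr ⟨hm, hp⟩]

theorem pvInsertDesc_mem (name y : String) (l : List String) :
    y ∈ pvInsertDesc name l ↔ y = name ∨ y ∈ l := by
  induction l with
  | nil => simp [pvInsertDesc]
  | cons x rest ih =>
      simp only [pvInsertDesc]
      split_ifs with h1 h2
      · simp only [List.mem_cons, ih]; tauto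
      · subst h2; simp only [List.mem_cons]; tauto
      · simp only [List.mem_cons]

theorem pvInsertDesc_pairwise (name : String) (l : List String)
    (h : l.Pairwise (fun a b => b < a)) :
    (pvInsertDesc name l).Pairwise (fun a b => b < a) := by
  induction l with
  | nil => simp [pvInsertDesc]
  | cons x rest ih =>
      rw [List.pairwise_cons] at h
      obtain ⟨hx, hrest⟩ := h
      simp only [pvInsertDesc]
      split_ifs with h1 h2
      · rw [List.pairwise_cons]
        refine ⟨?_, ih hrest⟩
        intro y hy
        rcases (pvInsertDesc_mem name y rest).mp hy with rfl | hm
        · exact h1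
        · exact hx y hm
      · exact List.pairwise_cons.mpr ⟨hx, hrest⟩
      · have hlt : x < name := lt_of_le_of_ne (not_lt.mp h1) (Ne.symm h2)
        rw [List.pairwise_cons]
        refine ⟨?_, List.pairwise_cons.mpr ⟨hx, hrest⟩⟩
        intro y hy
        rcases List.mem_cons.mp hy with rfl | hm
        · exact hlt
        · exact lt_trans (hx y hm) hlt

-- invariant of B's fold: both components stay strictly descending and collect exactly
-- the (deduplicated) names seen so far, split by the predicate
theorem pvAltFold_inv (names : List String) (a b : List String)
    (ha : a.Pairwise (fun u v => v < u)) (hb : b.Pairwise (fun u v => v < u)) :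
    let r := names.foldl
      (fun (acc : List String × List String) name =>
        if pvIsLoopback name then (pvInsertDesc name acc.1, acc.2)
        else (acc.1, pvInsertDesc name acc.2)) (a, b)
    r.1.Pairwise (fun u v => v < u) ∧ r.2.Pairwise (fun u v => v < u) ∧
      (∀ x, x ∈ r.1 ↔ x ∈ a ∨ (x ∈ names ∧ pvIsLoopback x = true)) ∧
      (∀ x, x ∈ r.2 ↔ x ∈ b ∨ (x ∈ names ∧ pvIsLoopback x ≠ true)) := by
  induction names generalizing a b with
  | nil => exact ⟨ha, hb, fun x => by simp, fun x => by simp⟩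
  | cons n t ih =>
      simp only [List.foldl_cons]
      by_cases h : pvIsLoopback n = true
      · rw [if_pos h]
        obtain ⟨p1, p2, m1, m2⟩ := ih (pvInsertDesc n a) b (pvInsertDesc_pairwise n a ha) hb
        refine ⟨p1, p2, fun x => ?_, fun x => ?_⟩
        · rw [m1, pvInsertDesc_mem]
          simp only [List.mem_cons]
          constructor
          · rintro ((rfl | hx) | hx); exacts [Or.inr ⟨Or.inl rfl, h⟩, Or.inl hx,
              Or.inr ⟨Or.inr hx.1, hx.2⟩]
          · rintro (hx | ⟨(rfl | hm), hp⟩); exacts [Or.inl (Or.inr hx), Or.inl (Or.inl rfl),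
              Or.inr ⟨hm, hp⟩]
        · rw [m2]
          simp only [List.mem_cons]
          constructor
          · rintro (hx | hx); exacts [Or.inl hx, Or.inr ⟨Or.inr hx.1, hx.2⟩]
          · rintro (hx | ⟨(rfl | hm), hp⟩); exacts [Or.inl hx, absurd h hp, Or.inr ⟨hm, hp⟩]
      · rw [if_neg h]
        obtain ⟨p1, p2, m1, m2⟩ := ih a (pvInsertDesc n b) ha (pvInsertDesc_pairwise n b hb)
        refine ⟨p1, p2, fun x => ?_, fun x => ?_⟩
        · rw [m1]
          simp only [List.mem_cons]
          constructor
          · rintro (hx | hx); exacts [Or.inl hx, Or.inr ⟨Or.inr hx.1, hx.2⟩]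
          · rintro (hx | ⟨(rfl | hm), hp⟩); exacts [Or.inl hx, absurd hp h, Or.inr ⟨hm, hp⟩]
        · rw [m2, pvInsertDesc_mem]
          simp only [List.mem_cons]
          constructor
          · rintro ((rfl | hx) | hx); exacts [Or.inr ⟨Or.inl rfl, h⟩, Or.inl hx,
              Or.inr ⟨Or.inr hx.1, hx.2⟩]
          · rintro (hx | ⟨(rfl | hm), hp⟩); exacts [Or.inl (Or.inr hx), Or.inl (Or.inl rfl),
              Or.inr ⟨hm, hp⟩]

-- two strictly descending lists with the same members are equal
theorem pvDescEq (l1 l2 : List String)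
    (h1 : l1.Pairwise (fun u v => v < u)) (h2 : l2.Pairwise (fun u v => v < u))
    (hm : ∀ x, x ∈ l1 ↔ x ∈ l2) : l1 = l2 := by
  have n1 : l1.Nodup := h1.imp fun h => ne_of_gt h
  have n2 : l2.Nodup := h2.imp fun h => ne_of_gt h
  have hp : l1.Perm l2 := (List.perm_ext_iff_of_nodup n1 n2).mpr hm
  exact hp.eq_of_pairwise (fun a b _ _ h h' => absurd h' (asymm h)) h1 h2

theorem known_loopbacks_spec : Claim_equal_known_loopbacks := by
  intro names _
  unfold Spec_known_loopbacks known_loopbacks known_loopbacks_alt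
  have hstep : (fun (s : PySem.Set String) name => pvLoopAdd ["IAC Driver", "Midi Through"] name s) =
      (fun s name => if pvIsLoopback name then PySem.Set.add s name else s) :=
    funext fun s => funext fun name => pvLoopAdd_eq name s
  rw [hstep]
  obtain ⟨p1, p2, m1, m2⟩ := pvAltFold_inv names [] [] (by simp) (by simp)
  set lbs := names.foldl (fun s name => if pvIsLoopback name then PySem.Set.add s name else s)
      PySem.Set.empty with hlbs
  have hlnodup : lbs.Nodup := pvFold_nodup names PySem.Set.empty List.nodup_nil
  have hemp : ∀ x : String, x ∉ (PySem.Set.empty : PySem.Set String) := by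
    intro x hx; simp [PySem.Set.empty] at hx
  have hlmem : ∀ x, x ∈ lbs ↔ x ∈ names ∧ pvIsLoopback x = true := by
    intro x
    rw [hlbs, pvFold_mem]
    exact ⟨fun h => h.resolve_left (hemp x), Or.inr⟩
  refine Prod.ext ?_ ?_
  · -- loopbacks component
    have hsp : (PySem.List.sorted lbs (fun x => x) true).Perm lbs := PySem.List.sorted_perm ..
    have hnd : (PySem.List.sorted lbs (fun x => x) true).Nodup := hsp.nodup_iff.mpr hlnodup
    have hpw : (PySem.List.sorted lbs (fun x => x) true).Pairwise (fun a b : String => b < a) := by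
      have hle : (PySem.List.sorted lbs (fun x => x) true).Pairwise (fun a b : String => b ≤ a) :=
        PySem.List.sorted_pairwise_rev ..
      exact (hle.and hnd).imp fun h => lt_of_le_of_ne h.1 (Ne.symm h.2)
    refine pvDescEq _ _ hpw p1 fun x => ?_
    rw [hsp.mem_iff, hlmem, m1]
    simp
  · -- others component
    have hond : (PySem.Set.diff (PySem.Set.ofList names) lbs).Nodup :=
      PySem.Set.nodup_diff _ _ (PySem.Set.nodup_ofList names)
    have hsp : (PySem.List.sorted (PySem.Set.diff (PySem.Set.ofList names) lbs) (fun x => x) true).Perm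
        (PySem.Set.diff (PySem.Set.ofList names) lbs) := PySem.List.sorted_perm ..
    have hnd : (PySem.List.sorted (PySem.Set.diff (PySem.Set.ofList names) lbs) (fun x => x) true).Nodup :=
      hsp.nodup_iff.mpr hond
    have hpw : (PySem.List.sorted (PySem.Set.diff (PySem.Set.ofList names) lbs) (fun x => x)
        true).Pairwise (fun a b : String => b < a) := by
      have hle : (PySem.List.sorted (PySem.Set.diff (PySem.Set.ofList names) lbs) (fun x => x)
          true).Pairwise (fun a b : String => b ≤ a) := PySem.List.sorted_pairwise_rev ..
      exact (hle.and hnd).imp fun h => lt_of_le_of_ne h.1 (Ne.symm h.2)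
    refine pvDescEq _ _ hpw p2 fun x => ?_
    rw [hsp.mem_iff, PySem.Set.mem_diff, PySem.Set.mem_ofList, hlmem, m2]
    simp only [List.not_mem_nil, false_or]
    constructor
    · rintro ⟨hn, hnl⟩
      exact ⟨hn, fun hp => hnl ⟨hn, hp⟩⟩
    · rintro ⟨hn, hnp⟩
      exact ⟨hn, fun h => hnp h.2⟩
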